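-- pv_equiv track=rewrite | github.com/eple0329/Algorithm | 프로그래머스/unrated/155652. 둘만의 암호/둘만의 암호.py | solution
-- ===== SOURCE A (Python) =====
-- def solution(s, skip, index):
--     answer = []
--     skip_num = []
--     for i in skip:
--         skip_num.append(ord(i))
--     for i in s:
--         n = 0
--         num = ord(i)
--         while(n < index):
--             num += 1
--             if num > ord("z"):
--                 num = ord("a")
--             if num not in skip_num:
--                 n += 1
--         answer.append(chr(num))
--     return "".join(answer)
-- ===== SOURCE B (Python) =====
-- def solution(s, skip, index):
--     if index <= 0:
--         return s
--     sk = set(map(ord, skip))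
--     cycle = [c for c in range(97, 123) if c not in sk]
--     out = []
--     for ch in s:
--         u = ord(ch)
--         prefix = [c for c in range(u + 1, 123) if c not in sk]
--         if index <= len(prefix):
--             out.append(chr(prefix[index - 1]))
--         else:
--             rem = index - len(prefix) - 1
--             out.append(chr(cycle[rem % len(cycle)]))
--     return "".join(out)
-- ===== Notes on version B (the rewrite author's own statement) =====
-- stated objective: faster
-- what changed: Replaces the per-character step-by-step while loop (index iterations each) by direct indexing into the precomputed non-skip prefix list and cyclic non-skip alphabet with modular arithmetic, so each character costs O(26) instead of O(index).
import Mathlib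
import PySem

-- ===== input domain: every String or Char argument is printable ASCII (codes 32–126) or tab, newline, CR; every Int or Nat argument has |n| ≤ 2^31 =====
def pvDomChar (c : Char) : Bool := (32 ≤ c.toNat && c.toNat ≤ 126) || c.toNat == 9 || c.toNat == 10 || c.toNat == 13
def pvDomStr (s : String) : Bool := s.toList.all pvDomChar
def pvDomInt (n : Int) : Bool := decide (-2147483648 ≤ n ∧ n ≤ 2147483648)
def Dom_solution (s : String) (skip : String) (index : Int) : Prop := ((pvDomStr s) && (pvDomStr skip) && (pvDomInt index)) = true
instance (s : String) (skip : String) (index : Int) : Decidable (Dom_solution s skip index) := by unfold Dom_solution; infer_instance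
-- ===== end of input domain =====

-- B replaces A's per-character O(index) stepping loop by direct indexing into the
-- precomputed non-skip prefix/cycle lists with modular arithmetic (objective: faster).


-- ===== PORT A =====
-- ord(c)
def pvOrd (c : Char) : Int := (c.toNat : Int)

-- 'num += 1; if num > ord("z"): num = ord("a")' — one raw step of A's while loop
def pvStep (num : Int) : Int := if num + 1 > 122 then 97 else num + 1

-- A's inner 'while n < index' loop over the state (num, n); the fuel argument only
-- makes the recursion total — inside Pre_ the fuel passed below is proved sufficient.
def pvLoopA (sk : List Int) (index : Int) : Int → Int → Nat → Int
  | num, _, 0 => num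
  | num, n, fuel+1 =>
    if n < index then
      if sk.contains (pvStep num) then pvLoopA sk index (pvStep num) n fuel
      else pvLoopA sk index (pvStep num) (n+1) fuel
    else num

def solution (s : String) (skip : String) (index : Int) : String :=
  let skip_num := skip.toList.map pvOrd  -- skip_num = [ord(i) for i in skip]
  String.ofList (s.toList.map (fun c =>
    Char.ofNat (pvLoopA skip_num index (pvOrd c) 0 (130 + 26 * index.toNat)).toNat))

-- ===== PORT B =====
def solution_alt (s : String) (skip : String) (index : Int) : String :=
  if index ≤ 0 then s
  else
    let sk : PySem.Set Int := PySem.Set.ofList (skip.toList.map pvOrd)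
    let cycle := (PySem.List.pyRange 97 123 1).filter (fun c => !(PySem.Set.contains sk c))
    String.ofList (s.toList.map (fun ch =>
      let u := pvOrd ch
      let pre := (PySem.List.pyRange (u + 1) 123 1).filter (fun c => !(PySem.Set.contains sk c))
      if index ≤ (pre.length : Int) then
        Char.ofNat (PySem.List.pyGetD pre (index - 1) 0).toNat
      else
        Char.ofNat (PySem.List.pyGetD cycle
          (PySem.Int.mod (index - (pre.length : Int) - 1) (cycle.length : Int)) 0).toNat))

-- ===== PRECONDITION & SPEC =====
-- Pre_ excludes exactly the inputs where Python A DIVERGES (returns nothing): index > 0,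
-- every lowercase letter occurs in skip, and some character of s has fewer than index
-- non-skip codes strictly between it and 'z' (Python B raises ZeroDivisionError there).
def Pre_solution (s : String) (skip : String) (index : Int) : Prop :=
  index ≤ 0 ∨
  (∃ v ∈ PySem.List.pyRange 97 123 1, ¬ (skip.toList.map pvOrd).contains v) ∨
  (∀ c ∈ s.toList, index ≤
    (((PySem.List.pyRange (pvOrd c + 1) 123 1).filter
        (fun v => !(skip.toList.map pvOrd).contains v)).length : Int))
instance (s : String) (skip : String) (index : Int) : Decidable (Pre_solution s skip index) := by
  unfold Pre_solution; infer_instance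

def pvWitness_solution : String × String × Int := ("ab", "xz", 3)

def Spec_solution (s : String) (skip : String) (index : Int) (out : String) : Prop := out = solution_alt s skip index
instance (s : String) (skip : String) (index : Int) (out : String) : Decidable (Spec_solution s skip index out) := by unfold Spec_solution; infer_instance

-- ===== CLAIM (what is proved, stated in full; the proofs are below) =====
def Claim_equal_solution : Prop := ∀ (s : String) (skip : String) (index : Int), Dom_solution s skip index → Pre_solution s skip index → Spec_solution s skip index (solution s skip index)

-- ===== LEMMAS AND PROOFS =====

-- the list of raw values A's loop visits in its first T iterations
def pvRawList (num : Int) (T : Nat) : List Int :=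
  (List.range T).map (fun t => pvStep^[t+1] num)

theorem pvRawList_succ (num : Int) (T : Nat) :
    pvRawList num (T+1) = pvStep num :: pvRawList (pvStep num) T := by
  simp [pvRawList, List.range_succ_eq_map, List.map_map, Function.comp_def,
    Function.iterate_succ_apply]

theorem pvRawList_add (num : Int) (a b : Nat) :
    pvRawList num (a + b) = pvRawList num a ++ pvRawList (pvStep^[a] num) b := by
  induction a generalizing num with
  | zero => simp [pvRawList]
  | succ a ih =>
      have h1 : a + 1 + b = (a + b) + 1 := by omega
      rw [h1, pvRawList_succ, ih, pvRawList_succ, ← Function.iterate_succ_apply]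
      simp

theorem pvLoopA_done (sk : List Int) (index num n : Int) (fuel : Nat) (h : ¬ n < index) :
    pvLoopA sk index num n fuel = num := by
  cases fuel <;> simp [pvLoopA, h]

theorem pvLoopA_eq (sk : List Int) (index : Int) :
    ∀ (fuel : Nat) (num n : Int), 0 < index - n →
    (index - n).toNat - 1 < ((pvRawList num fuel).filter (fun v => !sk.contains v)).length →
    pvLoopA sk index num n fuel
      = ((pvRawList num fuel).filter (fun v => !sk.contains v)).getD ((index - n).toNat - 1) 0 := by
  intro fuel
  induction fuel with
  | zero => intro num n h1 h2; simp [pvRawList] at h2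
  | succ fuel ih =>
      intro num n h1 h2
      rw [pvRawList_succ] at h2 ⊢
      have hlt : n < index := by omega
      by_cases hc : sk.contains (pvStep num)
      · simp only [List.filter_cons, hc] at h2 ⊢
        simp only [Bool.not_true] at h2 ⊢
        rw [pvLoopA, if_pos hlt, if_pos hc]
        exact ih (pvStep num) n h1 h2
      · have hc' : (!sk.contains (pvStep num)) = true := by
          cases h : sk.contains (pvStep num) <;> simp_all
        have hfc : (pvStep num :: pvRawList (pvStep num) fuel).filter (fun v => !sk.contains v)
            = pvStep num :: (pvRawList (pvStep num) fuel).filter (fun v => !sk.contains v) := by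
          simp only [List.filter_cons, hc', if_true]
        rw [hfc] at h2 ⊢
        rw [pvLoopA, if_pos hlt, if_neg hc]
        by_cases hone : index - (n+1) ≤ 0
        · have hidx : index = n + 1 := by omega
          subst hidx
          have hz : (n + 1 - n).toNat - 1 = 0 := by omega
          rw [hz]
          simp [pvLoopA_done sk (n+1) (pvStep num) (n+1) fuel (by omega)]
        · have h1' : 0 < index - (n+1) := by omega
          have hEq : (index - n).toNat - 1 = ((index - (n+1)).toNat - 1) + 1 := by omega
          rw [hEq, List.getD_cons_succ]
          refine ih (pvStep num) (n+1) h1' ?_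
          simp only [List.length_cons] at h2
          omega

-- pvStep just adds one below 122
theorem pvStep_iterate (u : Int) : ∀ (k : Nat), u + k ≤ 122 → pvStep^[k] u = u + k := by
  intro k
  induction k generalizing u with
  | zero => simp
  | succ k ih =>
      intro h
      rw [Function.iterate_succ_apply]
      have hs : pvStep u = u + 1 := by simp [pvStep]; omega
      rw [hs, ih (u+1) (by push_cast at h ⊢; omega)]
      push_cast; ring

-- the first (122-u)⁺ raw values are exactly range(u+1, 123), landing at a value in [122, 126]
theorem pvRaw_prefix (u : Int) (h9 : 9 ≤ u) (h126 : u ≤ 126) :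
    pvRawList u (122 - u).toNat = PySem.List.pyRange (u + 1) 123 1
      ∧ 122 ≤ pvStep^[(122 - u).toNat] u ∧ pvStep^[(122 - u).toNat] u ≤ 126 := by
  refine ⟨?_, ?_⟩
  · rw [PySem.List.pyRange_one]
    have hlen : (123 - (u+1)).toNat = (122 - u).toNat := by omega
    rw [hlen]
    unfold pvRawList
    refine List.map_congr_left ?_
    intro t ht
    rw [List.mem_range] at ht
    rw [pvStep_iterate u (t+1) (by omega)]
    push_cast; ring
  · by_cases h : u ≤ 122
    · rw [pvStep_iterate u ((122-u).toNat) (by omega)]; omega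
    · have hz : (122 - u).toNat = 0 := by omega
      rw [hz]; simp; omega

-- from any value in [122, 126] the next 26 raw values are one full alphabet cycle
theorem pvRaw_cycle (v : Int) (hv : 122 ≤ v) (hv' : v ≤ 126) :
    pvRawList v 26 = PySem.List.pyRange 97 123 1 ∧ pvStep^[26] v = 122 := by
  have hs : pvStep v = 97 := by simp [pvStep]; omega
  have h97 := pvRaw_prefix 97 (by norm_num) (by norm_num)
  have h25 : ((122:Int) - 97).toNat = 25 := by omega
  rw [h25] at h97
  constructor
  · rw [show (26:Nat) = 1 + 25 from rfl, pvRawList_add]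
    have h1 : pvRawList v 1 = [97] := by
      simp [pvRawList, hs]
    rw [show pvStep^[1] v = 97 by simp [hs], h1, h97.1]
    decide
  · rw [show (26:Nat) = 25 + 1 from rfl, Function.iterate_succ_apply, hs,
      pvStep_iterate 97 25 (by norm_num)]
    norm_num

theorem pvRaw_cycles (m : Nat) (v : Int) (hv : 122 ≤ v) (hv' : v ≤ 126) :
    pvRawList v (26 * m) = (List.replicate m (PySem.List.pyRange 97 123 1)).flatten := by
  induction m generalizing v with
  | zero => simp [pvRawList]
  | succ m ih =>
      have h1 : 26 * (m + 1) = 26 + 26 * m := by omega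
      rw [h1, pvRawList_add, (pvRaw_cycle v hv hv').1, (pvRaw_cycle v hv hv').2]
      rw [ih 122 (by norm_num) (by norm_num)]
      simp [List.replicate_succ]

theorem pvFilter_flatten_replicate (q : Int → Bool) (m : Nat) (D : List Int) :
    ((List.replicate m D).flatten).filter q = (List.replicate m (D.filter q)).flatten := by
  induction m with
  | zero => simp
  | succ m ih => simp [List.replicate_succ, List.filter_append, ih]

theorem pvGetD_flatten_replicate (D : List Int) :
    ∀ (m j : Nat), j < m * D.length →
    ((List.replicate m D).flatten).getD j 0 = D.getD (j % D.length) 0 := by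
  intro m
  induction m with
  | zero => intro j hj; omega
  | succ m ih =>
      intro j hj
      rw [List.replicate_succ, List.flatten_cons]
      by_cases h : j < D.length
      · rw [List.getD_append _ _ _ _ h, Nat.mod_eq_of_lt h]
      · rw [List.getD_append_right _ _ _ _ (by omega)]
        rw [ih (j - D.length) (by rw [Nat.add_mul] at hj; omega)]
        have hm : (j - D.length) % D.length = j % D.length :=
          (Nat.mod_eq_sub_mod (by omega)).symm
        rw [hm]

-- getD into the filtered raw list is stable under increasing fuel
theorem pvFilter_stable (q : Int → Bool) (u : Int) (F' F : Nat) (hF : F' ≤ F) (j : Nat)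
    (hj : j < ((pvRawList u F').filter q).length) :
    j < ((pvRawList u F).filter q).length ∧
    ((pvRawList u F).filter q).getD j 0 = ((pvRawList u F').filter q).getD j 0 := by
  have hsplit : F = F' + (F - F') := by omega
  rw [hsplit, pvRawList_add, List.filter_append]
  constructor
  · rw [List.length_append]; omega
  · exact List.getD_append _ _ _ _ hj

-- the heart of the equivalence: per start value u, A's loop equals B's direct lookup
theorem pvChar_eq (sk : List Int) (index u : Int) (h9 : 9 ≤ u) (h126 : u ≤ 126)
    (hpos : 0 < index)
    (hP : index ≤ (((PySem.List.pyRange (u+1) 123 1).filter (fun v => !sk.contains v)).length : Int)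
          ∨ ((PySem.List.pyRange 97 123 1).filter (fun v => !sk.contains v)) ≠ []) :
    pvLoopA sk index u 0 (130 + 26 * index.toNat)
      = (if index ≤ ((((PySem.List.pyRange (u+1) 123 1).filter (fun v => !sk.contains v)).length : Nat) : Int)
         then PySem.List.pyGetD ((PySem.List.pyRange (u+1) 123 1).filter (fun v => !sk.contains v)) (index - 1) 0
         else PySem.List.pyGetD ((PySem.List.pyRange 97 123 1).filter (fun v => !sk.contains v))
           (PySem.Int.mod (index - ((((PySem.List.pyRange (u+1) 123 1).filter (fun v => !sk.contains v)).length : Nat) : Int) - 1)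
             ((((PySem.List.pyRange 97 123 1).filter (fun v => !sk.contains v)).length : Nat) : Int)) 0) := by
  set q : Int → Bool := fun v => !sk.contains v with hq
  set P : List Int := (PySem.List.pyRange (u+1) 123 1).filter q with hPdef
  set C : List Int := (PySem.List.pyRange 97 123 1).filter q with hCdef
  set ix : Nat := index.toNat with hix
  have hix1 : 1 ≤ ix := by omega
  set pu : Nat := (122 - u).toNat with hpu
  have hpu130 : pu ≤ 130 := by omega
  obtain ⟨hpre1, hland1, hland2⟩ := pvRaw_prefix u h9 h126
  have hraw : (pvRawList u (pu + 26 * ix)).filter q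
      = P ++ (List.replicate ix C).flatten := by
    rw [pvRawList_add, List.filter_append, hpre1,
      pvRaw_cycles ix (pvStep^[pu] u) hland1 hland2, pvFilter_flatten_replicate]
  have hlenflat : ((List.replicate ix C).flatten).length = ix * C.length := by simp
  -- A's loop equals the getD into the filtered raw list at ix - 1
  have hA : ∀ hlt : ix - 1 < ((pvRawList u (pu + 26 * ix)).filter q).length,
      pvLoopA sk index u 0 (130 + 26 * index.toNat)
        = ((pvRawList u (pu + 26 * ix)).filter q).getD (ix - 1) 0 := by
    intro hlt
    obtain ⟨hlt2, hval⟩ := pvFilter_stable q u (pu + 26 * ix) (130 + 26 * index.toNat)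
      (by omega) (ix - 1) hlt
    rw [← hval]
    have := pvLoopA_eq sk index (130 + 26 * index.toNat) u 0 (by omega) (by
      have : (index - 0).toNat - 1 = ix - 1 := by omega
      rw [this]; exact hlt2)
    rw [this]
    have h0 : (index - 0).toNat - 1 = ix - 1 := by omega
    rw [h0]
  by_cases hcase : index ≤ ((P.length : Nat) : Int)
  · rw [if_pos hcase]
    have hlt : ix - 1 < ((pvRawList u (pu + 26 * ix)).filter q).length := by
      rw [hraw, List.length_append]; omega
    rw [hA hlt, hraw, List.getD_append _ _ _ _ (by omega)]
    rw [show index - 1 = ((ix - 1 : Nat) : Int) by omega, PySem.List.pyGetD_natCast]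
  · rw [if_neg hcase]
    have hC : C ≠ [] := by
      rcases hP with h | h
      · exact absurd h hcase
      · exact h
    have hClen : 0 < C.length := List.length_pos_iff.mpr hC
    have hixle : ix ≤ ix * C.length := Nat.le_mul_of_pos_right ix hClen
    have hlt : ix - 1 < ((pvRawList u (pu + 26 * ix)).filter q).length := by
      rw [hraw, List.length_append, hlenflat]; omega
    rw [hA hlt, hraw, List.getD_append_right _ _ _ _ (by omega)]
    rw [pvGetD_flatten_replicate C ix (ix - 1 - P.length) (by omega)]
    rw [show index - ((P.length : Nat) : Int) - 1 = ((ix - 1 - P.length : Nat) : Int) by omega]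
    rw [PySem.Int.mod_natCast, PySem.List.pyGetD_natCast]

-- ===== VERDICT (by name: the statement is the Claim_ definition above) =====
theorem solution_spec : Claim_equal_solution := by
  intro s skip index hdom hpre
  unfold Spec_solution solution solution_alt
  dsimp only []
  have hcontains : ∀ v : Int,
      (PySem.Set.ofList (skip.toList.map pvOrd)).contains v = (skip.toList.map pvOrd).contains v := by
    intro v; simp [PySem.Set.mem_ofList]
  by_cases hle : index ≤ 0
  · rw [if_pos hle]
    have hmap : s.toList.map (fun c =>
        Char.ofNat (pvLoopA (skip.toList.map pvOrd) index (pvOrd c) 0 (130 + 26 * index.toNat)).toNat)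
        = s.toList := by
      refine List.map_congr_left ?_ |>.trans (List.map_id _)
      intro c _
      rw [pvLoopA_done _ _ _ _ _ (by omega)]
      simp [pvOrd, Char.ofNat_toNat]
    rw [hmap, String.ofList_toList]
  · rw [if_neg hle]
    have hpos : 0 < index := by omega
    simp only [Dom_solution, Bool.and_eq_true, pvDomStr, List.all_eq_true] at hdom
    congr 1
    refine List.map_congr_left ?_
    intro c hc
    have hcdom := hdom.1.1 c hc
    have h9 : 9 ≤ pvOrd c := by
      simp [pvDomChar] at hcdom; simp [pvOrd]; omega
    have h126 : pvOrd c ≤ 126 := by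
      simp [pvDomChar] at hcdom; simp [pvOrd]; omega
    have hP : index ≤ (((PySem.List.pyRange (pvOrd c + 1) 123 1).filter
          (fun v => !(skip.toList.map pvOrd).contains v)).length : Int)
        ∨ ((PySem.List.pyRange 97 123 1).filter
          (fun v => !(skip.toList.map pvOrd).contains v)) ≠ [] := by
      rcases hpre with h | h | h
      · omega
      · obtain ⟨v, hv1, hv2⟩ := h
        exact Or.inr (List.ne_nil_of_mem (List.mem_filter.mpr ⟨hv1, by simpa using hv2⟩))
      · exact Or.inl (h c hc)
    simp only [hcontains]
    rw [pvChar_eq (skip.toList.map pvOrd) index (pvOrd c) h9 h126 hpos hP]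
    rw [apply_ite (fun z : Int => Char.ofNat z.toNat)]
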